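-- pv_equiv track=rewrite | github.com/nicolemagdz/SortingHat | sort.py | determine_house
-- ===== SOURCE A (Python) =====
-- def determine_house(answers):
--     # Dictionary to keep score for each house
--     scores = {"Gryffindor": 0, "Hufflepuff": 0, "Ravenclaw": 0, "Slytherin": 0}
--
--     # Mapping of answers to respective houses
--     mapping = {
--         "Bravery": "Gryffindor",
--         "Loyalty": "Hufflepuff",
--         "Wisdom": "Ravenclaw",
--         "Ambition": "Slytherin",
--         "Phoenix": "Gryffindor",
--         "Hippogrif": "Hufflepuff",
--         "Owl": "Ravenclaw",
--         "Basilisk": "Slytherin",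
--         "Defense Against the Dark Arts": "Gryffindor",
--         "Herbology": "Hufflepuff",
--         "Charms": "Ravenclaw",
--         "Potions": "Slytherin"
--     }
--
--     # Going through answers and updating house scores
--     for answer in answers:
--         if answer in mapping:
--             scores[mapping[answer]] += 1
--
--     # Determining house with highest score
--     sorted_house = max(scores, key=scores.get)
--     return sorted_house
-- ===== SOURCE B (Python) =====
-- def determine_house(answers):
--     # Inverted table: each house (in the original insertion order) with the
--     # answer keywords that score for it; one scan of the answers per house,
--     # keeping the first house with the highest count.
--     triggers = [
--         ("Gryffindor", {"Bravery", "Phoenix", "Defense Against the Dark Arts"}),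
--         ("Hufflepuff", {"Loyalty", "Hippogrif", "Herbology"}),
--         ("Ravenclaw", {"Wisdom", "Owl", "Charms"}),
--         ("Slytherin", {"Ambition", "Basilisk", "Potions"}),
--     ]
--     best_house, best_score = "", -1
--     for house, kws in triggers:
--         score = sum(1 for a in answers if a in kws)
--         if score > best_score:
--             best_house, best_score = house, score
--     return best_house
-- ===== Notes on version B (the rewrite author's own statement) =====
-- stated objective: alternative
-- what changed: Replaces the single indexed pass that increments a score dict keyed through an answer->house mapping (then max over the dict) with an inverted house->keywords table scanned per house, counting matches per house and keeping a running best.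
import Mathlib
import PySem

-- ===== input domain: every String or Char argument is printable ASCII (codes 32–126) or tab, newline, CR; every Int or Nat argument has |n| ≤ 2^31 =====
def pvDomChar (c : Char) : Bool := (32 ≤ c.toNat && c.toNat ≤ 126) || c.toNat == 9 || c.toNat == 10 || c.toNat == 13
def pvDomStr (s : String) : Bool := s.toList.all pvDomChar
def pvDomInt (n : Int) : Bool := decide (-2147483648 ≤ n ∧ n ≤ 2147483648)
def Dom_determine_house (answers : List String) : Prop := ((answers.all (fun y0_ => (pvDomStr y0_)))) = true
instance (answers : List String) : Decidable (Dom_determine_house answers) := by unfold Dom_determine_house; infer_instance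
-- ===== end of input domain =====

-- B replaces A's answer->house mapping pass over one score dict by an inverted house->keywords
-- table scanned once per house with a running best; same return value, proved equivalent.

-- ===== PORT A =====
def dhMapping : PySem.Dict String String := PySem.Dict.ofList [
  ("Bravery", "Gryffindor"), ("Loyalty", "Hufflepuff"), ("Wisdom", "Ravenclaw"),
  ("Ambition", "Slytherin"), ("Phoenix", "Gryffindor"), ("Hippogrif", "Hufflepuff"),
  ("Owl", "Ravenclaw"), ("Basilisk", "Slytherin"),
  ("Defense Against the Dark Arts", "Gryffindor"), ("Herbology", "Hufflepuff"),
  ("Charms", "Ravenclaw"), ("Potions", "Slytherin")]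

def determine_house (answers : List String) : String :=
  let scores : PySem.Dict String Int :=
    PySem.Dict.ofList [("Gryffindor", 0), ("Hufflepuff", 0), ("Ravenclaw", 0), ("Slytherin", 0)]
  let scores := answers.foldl (fun sc answer =>
    match dhMapping.get? answer with
    | some hh => sc.modify hh 0 (· + 1)   -- scores[mapping[answer]] += 1 (the key is always present)
    | none => sc) scores
  -- max(scores, key=scores.get): first key with maximal value; keys are always the four houses,
  -- so max? is never none and the .getD "" default is never used
  (PySem.List.max? scores.keys (fun k => scores.getD k 0)).getD ""

-- ===== PORT B =====
def dhTriggers : List (String × List String) := [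
  ("Gryffindor", ["Bravery", "Phoenix", "Defense Against the Dark Arts"]),
  ("Hufflepuff", ["Loyalty", "Hippogrif", "Herbology"]),
  ("Ravenclaw", ["Wisdom", "Owl", "Charms"]),
  ("Slytherin", ["Ambition", "Basilisk", "Potions"])]

def determine_house_alt (answers : List String) : String :=
  (dhTriggers.foldl (fun (best : String × Int) p =>
      let score : Int := (answers.map (fun a => if p.2.contains a then (1 : Int) else 0)).sum
      if score > best.2 then (p.1, score) else best) ("", -1)).1

-- ===== PRECONDITION & SPEC =====
def Spec_determine_house (answers : List String) (out : String) : Prop := out = determine_house_alt answers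
instance (answers : List String) (out : String) : Decidable (Spec_determine_house answers out) := by unfold Spec_determine_house; infer_instance

-- ===== CLAIM (what is proved, stated in full; the proofs are below) =====
def Claim_equal_determine_house : Prop := ∀ (answers : List String), Dom_determine_house answers → Spec_determine_house answers (determine_house answers)

-- ===== LEMMAS AND PROOFS =====

theorem dhMapping_eq : dhMapping = PySem.Dict.mk [
    ("Bravery", "Gryffindor"), ("Loyalty", "Hufflepuff"), ("Wisdom", "Ravenclaw"),
    ("Ambition", "Slytherin"), ("Phoenix", "Gryffindor"), ("Hippogrif", "Hufflepuff"),
    ("Owl", "Ravenclaw"), ("Basilisk", "Slytherin"),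
    ("Defense Against the Dark Arts", "Gryffindor"), ("Herbology", "Hufflepuff"),
    ("Charms", "Ravenclaw"), ("Potions", "Slytherin")] := by decide

-- A's loop body, rephrased as a decision on which house (if any) the answer scores for.
theorem dh_step (x : String) (d : PySem.Dict String Int) :
    (match dhMapping.get? x with
      | some hh => d.modify hh 0 (· + 1)
      | none => d)
    = (if x = "Bravery" ∨ x = "Phoenix" ∨ x = "Defense Against the Dark Arts" then d.modify "Gryffindor" 0 (· + 1)
       else if x = "Loyalty" ∨ x = "Hippogrif" ∨ x = "Herbology" then d.modify "Hufflepuff" 0 (· + 1)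
       else if x = "Wisdom" ∨ x = "Owl" ∨ x = "Charms" then d.modify "Ravenclaw" 0 (· + 1)
       else if x = "Ambition" ∨ x = "Basilisk" ∨ x = "Potions" then d.modify "Slytherin" 0 (· + 1)
       else d) := by
  by_cases hmem : x ∈ ["Bravery", "Loyalty", "Wisdom", "Ambition", "Phoenix", "Hippogrif",
      "Owl", "Basilisk", "Defense Against the Dark Arts", "Herbology", "Charms", "Potions"]
  · fin_cases hmem <;> simp [dhMapping_eq, PySem.Dict.get?, List.find?]
  · simp only [List.mem_cons] at hmem
    push_neg at hmem
    obtain ⟨n1, n2, n3, n4, n5, n6, n7, n8, n9, n10, n11, n12, -⟩ := hmem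
    have hx : dhMapping.get? x = none := by
      rw [dhMapping_eq]
      simp [PySem.Dict.get?, List.find?_eq_none]
      exact ⟨fun h => n1 h.symm, fun h => n2 h.symm, fun h => n3 h.symm, fun h => n4 h.symm,
        fun h => n5 h.symm, fun h => n6 h.symm, fun h => n7 h.symm, fun h => n8 h.symm,
        fun h => n9 h.symm, fun h => n10 h.symm, fun h => n11 h.symm, fun h => n12 h.symm⟩
    rw [hx]
    simp [n1, n2, n3, n4, n5, n6, n7, n8, n9, n10, n11, n12]

theorem dh_modify (hh : String) (hmem : hh ∈ ["Gryffindor", "Hufflepuff", "Ravenclaw", "Slytherin"])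
    (g h r s : Int) :
    (PySem.Dict.mk [("Gryffindor", g), ("Hufflepuff", h), ("Ravenclaw", r), ("Slytherin", s)]).modify hh 0 (· + 1)
    = PySem.Dict.mk [("Gryffindor", if hh = "Gryffindor" then g + 1 else g),
        ("Hufflepuff", if hh = "Hufflepuff" then h + 1 else h),
        ("Ravenclaw", if hh = "Ravenclaw" then r + 1 else r),
        ("Slytherin", if hh = "Slytherin" then s + 1 else s)] := by
  fin_cases hmem <;>
    simp [PySem.Dict.modify, PySem.Dict.insert, PySem.Dict.getD, PySem.Dict.get?,
      PySem.Dict.contains, List.find?]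

-- A's whole loop computes the four per-house keyword counts.
theorem dh_fold (answers : List String) (g h r s : Int) :
    answers.foldl (fun sc answer =>
      match dhMapping.get? answer with
      | some hh => sc.modify hh 0 (· + 1)
      | none => sc)
      (PySem.Dict.mk [("Gryffindor", g), ("Hufflepuff", h), ("Ravenclaw", r), ("Slytherin", s)])
    = PySem.Dict.mk [
        ("Gryffindor", g + answers.countP (fun a => a ∈ ["Bravery", "Phoenix", "Defense Against the Dark Arts"])),
        ("Hufflepuff", h + answers.countP (fun a => a ∈ ["Loyalty", "Hippogrif", "Herbology"])),
        ("Ravenclaw", r + answers.countP (fun a => a ∈ ["Wisdom", "Owl", "Charms"])),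
        ("Slytherin", s + answers.countP (fun a => a ∈ ["Ambition", "Basilisk", "Potions"]))] := by
  induction answers generalizing g h r s with
  | nil => simp
  | cons x t ih =>
    rw [List.foldl_cons, dh_step]
    simp only [List.countP_cons, List.mem_cons, List.not_mem_nil, or_false, decide_eq_true_eq]
    by_cases c1 : x = "Bravery" ∨ x = "Phoenix" ∨ x = "Defense Against the Dark Arts"
    · have c2 : ¬(x = "Loyalty" ∨ x = "Hippogrif" ∨ x = "Herbology") := by
        rcases c1 with h|h|h <;> subst h <;> decide
      have c3 : ¬(x = "Wisdom" ∨ x = "Owl" ∨ x = "Charms") := by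
        rcases c1 with h|h|h <;> subst h <;> decide
      have c4 : ¬(x = "Ambition" ∨ x = "Basilisk" ∨ x = "Potions") := by
        rcases c1 with h|h|h <;> subst h <;> decide
      simp only [eq_true c1, eq_false c2, eq_false c3, eq_false c4, if_true, if_false]
      rw [dh_modify "Gryffindor" (by simp), ih]
      simp
      omega
    · by_cases c2 : x = "Loyalty" ∨ x = "Hippogrif" ∨ x = "Herbology"
      · have c3 : ¬(x = "Wisdom" ∨ x = "Owl" ∨ x = "Charms") := by
          rcases c2 with h|h|h <;> subst h <;> decide
        have c4 : ¬(x = "Ambition" ∨ x = "Basilisk" ∨ x = "Potions") := by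
          rcases c2 with h|h|h <;> subst h <;> decide
        simp only [eq_true c2, eq_false c1, eq_false c3, eq_false c4, if_true, if_false]
        rw [dh_modify "Hufflepuff" (by simp), ih]
        simp
        omega
      · by_cases c3 : x = "Wisdom" ∨ x = "Owl" ∨ x = "Charms"
        · have c4 : ¬(x = "Ambition" ∨ x = "Basilisk" ∨ x = "Potions") := by
            rcases c3 with h|h|h <;> subst h <;> decide
          simp only [eq_true c3, eq_false c1, eq_false c2, eq_false c4, if_true, if_false]
          rw [dh_modify "Ravenclaw" (by simp), ih]
          simp
          omega
        · by_cases c4 : x = "Ambition" ∨ x = "Basilisk" ∨ x = "Potions"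
          · simp only [eq_true c4, eq_false c1, eq_false c2, eq_false c3, if_true, if_false]
            rw [dh_modify "Slytherin" (by simp), ih]
            simp
            omega
          · simp only [eq_false c1, eq_false c2, eq_false c3, eq_false c4, if_false]
            rw [ih]
            simp

-- B's per-house 0/1 sum is that house's keyword count.
theorem dh_count (l : List String) (answers : List String) :
    ((answers.map (fun a => if l.contains a then (1 : Int) else 0)).sum)
    = (answers.countP (fun a => a ∈ l) : Int) := by
  induction answers with
  | nil => simp
  | cons x t ih =>
    simp only [List.map_cons, List.sum_cons, List.countP_cons, ih]
    by_cases hx : x ∈ l <;> simp [hx] <;> ring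

-- Both selection rules pick the first house with maximal count.
theorem dh_select (cg ch cr cs : Int) (hg : 0 ≤ cg) (hh : 0 ≤ ch) (hr : 0 ≤ cr) (hs : 0 ≤ cs) :
    ((PySem.List.max? ["Gryffindor", "Hufflepuff", "Ravenclaw", "Slytherin"]
        (fun k => (PySem.Dict.mk [("Gryffindor", cg), ("Hufflepuff", ch), ("Ravenclaw", cr),
          ("Slytherin", cs)]).getD k 0)).getD "")
    = (([("Gryffindor", cg), ("Hufflepuff", ch), ("Ravenclaw", cr), ("Slytherin", cs)].foldl
        (fun (best : String × Int) p => if p.2 > best.2 then (p.1, p.2) else best) ("", -1)).1) := by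
  simp [PySem.List.max?, PySem.Dict.getD, PySem.Dict.get?, List.find?]
  have h0g : (-1:Int) < cg := by omega
  have h0h : (-1:Int) < ch := by omega
  have h0r : (-1:Int) < cr := by omega
  have h0s : (-1:Int) < cs := by omega
  by_cases h1 : cg < ch <;> by_cases h2 : ch < cr <;> by_cases h3 : cg < cr <;>
    by_cases h4 : cr < cs <;> by_cases h5 : ch < cs <;> by_cases h6 : cg < cs <;>
    simp [h0g, h0h, h0r, h0s, h1, h2, h3, h4, h5, h6] <;> omega

-- ===== VERDICT (by name: the statement is the Claim_ definition above) =====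
theorem determine_house_spec : Claim_equal_determine_house := by
  intro answers _
  unfold Spec_determine_house determine_house determine_house_alt
  dsimp only
  have h0 : (PySem.Dict.ofList [("Gryffindor", (0 : Int)), ("Hufflepuff", 0), ("Ravenclaw", 0), ("Slytherin", 0)])
      = PySem.Dict.mk [("Gryffindor", 0), ("Hufflepuff", 0), ("Ravenclaw", 0), ("Slytherin", 0)] := by decide
  rw [h0, dh_fold]
  simp only [zero_add, PySem.Dict.keys, PySem.Dict.items, List.map, dhTriggers, dh_count]
  exact dh_select _ _ _ _ (Int.natCast_nonneg _) (Int.natCast_nonneg _)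
    (Int.natCast_nonneg _) (Int.natCast_nonneg _)
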